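-- pv_equiv track=rewrite | github.com/Dinhh-Chan/baitap2 | btstring/bai11.py | chuoi_con_lon_nhat
-- ===== SOURCE A (Python) =====
-- def chuoi_con_lon_nhat(s):
--     do_dai_lon_nhat = 0
--     chuoi_lon_nhat = ""
--
--     current_length = 0
--     current_substring = ""
--
--     for char in s:
--         if char.isalpha() or char.isdigit():
--             current_length += 1
--             current_substring += char
--         else:
--             if current_length >= do_dai_lon_nhat:
--                 do_dai_lon_nhat = current_length
--                 chuoi_lon_nhat = current_substring
--             elif current_length == do_dai_lon_nhat:
--                 chuoi_lon_nhat = current_substring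
--             current_length = 0
--             current_substring = ""
--     if current_length > do_dai_lon_nhat:
--         chuoi_lon_nhat = current_substring
--     elif current_length == do_dai_lon_nhat:
--         chuoi_lon_nhat = current_substring
--
--     return chuoi_lon_nhat
-- ===== SOURCE B (Python) =====
-- def chuoi_con_lon_nhat(s):
--     # Phase 1: split s into maximal alphanumeric runs (as lists of chars).
--     runs = []
--     cur = []
--     for ch in s:
--         if ch.isalnum():
--             cur.append(ch)
--         else:
--             runs.append(cur)
--             cur = []
--     runs.append(cur)
--     # Phase 2: pick the last run of maximal length.
--     best = []
--     for r in runs: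
--         if len(r) >= len(best):
--             best = r
--     return ''.join(best)
-- ===== Notes on version B (the rewrite author's own statement) =====
-- stated objective: faster
-- what changed: Two-phase design: first split the string into maximal alphanumeric runs, then a separate scan picks the last run of maximal length, instead of A's single interleaved loop that maintains a max counter and rebuilds the candidate string by repeated concatenation.
import Mathlib
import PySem

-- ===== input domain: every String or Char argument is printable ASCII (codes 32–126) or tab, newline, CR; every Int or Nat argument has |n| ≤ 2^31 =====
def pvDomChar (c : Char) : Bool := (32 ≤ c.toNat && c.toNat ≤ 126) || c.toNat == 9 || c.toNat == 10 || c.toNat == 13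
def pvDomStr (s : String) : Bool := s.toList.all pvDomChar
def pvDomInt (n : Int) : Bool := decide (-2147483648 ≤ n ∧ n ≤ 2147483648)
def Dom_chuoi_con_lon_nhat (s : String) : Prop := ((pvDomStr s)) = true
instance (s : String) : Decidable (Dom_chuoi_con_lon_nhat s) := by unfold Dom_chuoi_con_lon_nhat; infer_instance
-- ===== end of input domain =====

-- B splits the string into maximal alphanumeric runs and then picks the last run of
-- maximal length in a second pass, instead of A's single interleaved max-tracking loop.

-- ===== PORT A =====
-- state: (do_dai_lon_nhat, chuoi_lon_nhat, current_length, current_substring)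
def pvStepA (st : Nat × List Char × Nat × List Char) (c : Char) :
    Nat × List Char × Nat × List Char :=
  let (doDai, chuoiLon, curLen, curSub) := st
  if PySem.Chars.isalpha c || PySem.Chars.isdigit c then
    (doDai, chuoiLon, curLen + 1, curSub ++ [c])
  else
    if curLen ≥ doDai then (curLen, curSub, 0, [])
    else if curLen = doDai then (doDai, curSub, 0, [])
    else (doDai, chuoiLon, 0, [])

def chuoi_con_lon_nhat (s : String) : String :=
  let st := s.toList.foldl pvStepA (0, [], 0, [])
  let (doDai, chuoiLon, curLen, curSub) := st
  if curLen > doDai then String.ofList curSub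
  else if curLen = doDai then String.ofList curSub
  else String.ofList chuoiLon

-- ===== PORT B =====
-- Phase 1: split into maximal alphanumeric runs; state = (runs, cur)
def pvStepB (st : List (List Char) × List Char) (c : Char) :
    List (List Char) × List Char :=
  if PySem.Chars.isalnum c then (st.1, st.2 ++ [c]) else (st.1 ++ [st.2], [])

-- Phase 2: last run of maximal length
def pvBestStep (b r : List Char) : List Char :=
  if r.length ≥ b.length then r else b

def chuoi_con_lon_nhat_alt (s : String) : String :=
  let p := s.toList.foldl pvStepB ([], [])
  let runs := p.1 ++ [p.2]
  String.ofList (runs.foldl pvBestStep [])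

-- ===== PRECONDITION & SPEC =====
def Spec_chuoi_con_lon_nhat (s : String) (out : String) : Prop := out = chuoi_con_lon_nhat_alt s
instance (s : String) (out : String) : Decidable (Spec_chuoi_con_lon_nhat s out) := by unfold Spec_chuoi_con_lon_nhat; infer_instance

-- ===== CLAIM (what is proved, stated in full; the proofs are below) =====
def Claim_equal_chuoi_con_lon_nhat : Prop := ∀ (s : String), Dom_chuoi_con_lon_nhat s → Spec_chuoi_con_lon_nhat s (chuoi_con_lon_nhat s)

-- ===== LEMMAS AND PROOFS =====

-- the accumulated run list is a prefix that B's fold only appends to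
theorem pvStepB_runs_prefix (l : List Char) (rs : List (List Char)) (cur : List Char) :
    l.foldl pvStepB (rs, cur) =
      (rs ++ (l.foldl pvStepB ([], cur)).1, (l.foldl pvStepB ([], cur)).2) := by
  induction l generalizing rs cur with
  | nil => simp
  | cons c l ih =>
    simp only [List.foldl_cons, pvStepB]
    by_cases h : PySem.Chars.isalnum c = true
    · simp only [if_pos h]
      exact ih rs (cur ++ [c])
    · simp only [h, Bool.false_eq_true, if_false, List.nil_append]
      rw [ih (rs ++ [cur]) [], ih [cur] []]
      simp

-- invariant relating A's fold state to B's (runs, cur) and the best-run fold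
theorem pvMain (l : List Char) (b cs : List Char) :
    l.foldl pvStepA (b.length, b, cs.length, cs) =
      (((l.foldl pvStepB ([], cs)).1.foldl pvBestStep b).length,
       (l.foldl pvStepB ([], cs)).1.foldl pvBestStep b,
       (l.foldl pvStepB ([], cs)).2.length,
       (l.foldl pvStepB ([], cs)).2) := by
  induction l generalizing b cs with
  | nil => simp
  | cons c l ih =>
    simp only [List.foldl_cons, pvStepA, pvStepB]
    have halnum : PySem.Chars.isalnum c = (PySem.Chars.isalpha c || PySem.Chars.isdigit c) := by
      simp [PySem.Chars.isalnum, PySem.Chars.isalpha, PySem.Chars.isdigit]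
    by_cases h : (PySem.Chars.isalpha c || PySem.Chars.isdigit c) = true
    · rw [halnum]; simp only [h, if_true]
      have := ih b (cs ++ [c])
      simpa using this
    · rw [halnum]; simp only [h, Bool.false_eq_true, if_false, List.nil_append]
      by_cases hge : cs.length ≥ b.length
      · simp only [if_pos hge]
        have := ih cs ([] : List Char)
        rw [pvStepB_runs_prefix l [cs] []]
        simp only [List.length_nil] at this
        rw [this]
        simp [pvBestStep, hge]
      · have hne : ¬ cs.length = b.length := by omega
        simp only [if_neg hge, if_neg hne]
        have := ih b ([] : List Char)
        rw [pvStepB_runs_prefix l [cs] []]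
        simp only [List.length_nil] at this
        rw [this]
        simp [pvBestStep, hge]

-- ===== VERDICT (by name: the statement is the Claim_ definition above) =====
theorem chuoi_con_lon_nhat_spec : Claim_equal_chuoi_con_lon_nhat := by
  intro s _
  unfold Spec_chuoi_con_lon_nhat chuoi_con_lon_nhat chuoi_con_lon_nhat_alt
  have h := pvMain s.toList [] []
  simp only [List.length_nil] at h
  rw [h]
  simp only [List.foldl_append, List.foldl_cons, List.foldl_nil]
  set best := (s.toList.foldl pvStepB ([], [])).1.foldl pvBestStep []
  set cur := (s.toList.foldl pvStepB ([], [])).2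
  by_cases hgt : cur.length > best.length
  · simp [hgt, pvBestStep, Nat.le_of_lt hgt]
  · by_cases heq : cur.length = best.length
    · simp [heq, pvBestStep]
    · have : ¬ cur.length ≥ best.length := by omega
      simp [hgt, heq, pvBestStep, this]
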